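-- pv_equiv track=rewrite | github.com/Derkades/WebApp | raphson_mp/charts.py | rows_to_xy_multi
-- ===== SOURCE A (Python) =====
-- def rows_to_xy_multi(rows: list[tuple[str, str, int]], case_sensitive=True, restore_case=False) -> tuple[list[str], dict[str, list[int]]]:
--     """
--     Convert rows
--     [a1, b1, c1]
--     [a1, b2, c2]
--     [a2, b1, c3]
--     to xdata: [a1, a2], ydata: {b1: [c1, c3], b2: [c2, 0]}
--     Where a appears on the x axis, b appears in in the legend (is stacked), and c is data.
--     """
--     # Create list of a values, sorted by total b for all a
--     a_list: list[str] = []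
--     a_counts: dict[str, int] = {} # for sorting
--     for a, _b, c in rows:
--         if not case_sensitive:
--             a = a.lower()
--
--         if a not in a_list:
--             a_list.append(a)
--             a_counts[a] = 0
--
--         a_counts[a if case_sensitive else a.lower()] += c
--
--     a_list = sorted(a_list, key=lambda a: -a_counts[a])
--
--     ydata: dict[str, list[int]] = {}
--
--     for a, b, c in rows:
--         if b not in ydata:
--             ydata[b] = [0] * len(a_list)
--         a_index = a_list.index(a if case_sensitive else a.lower())
--         ydata[b][a_index] = c
--
--     if restore_case:
--         # Restore original case
--         for i, a in enumerate(a_list):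
--             for a2, _b, _c in rows:
--                 if a.lower() == a2.lower():
--                     a_list[i] = a2
--                     break
--
--     return a_list, ydata
-- ===== SOURCE B (Python) =====
-- def rows_to_xy_multi(rows: list[tuple[str, str, int]], case_sensitive=True, restore_case=False) -> tuple[list[str], dict[str, list[int]]]:
--     key = (lambda a: a) if case_sensitive else (lambda a: a.lower())
--
--     # One pass: total count per x-key (dict insertion order = first appearance).
--     counts: dict[str, int] = {}
--     for a, _b, c in rows:
--         k = key(a)
--         counts[k] = counts.get(k, 0) + c
--
--     a_list = sorted(counts, key=lambda a: -counts[a])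
--
--     # One pass: the value of each (x-key, legend) cell is the c of its last row.
--     last: dict[tuple[str, str], int] = {}
--     for a, b, c in rows:
--         last[(key(a), b)] = c
--
--     # Legend keys in first-appearance order; build each series by direct lookup.
--     b_order = list(dict.fromkeys(b for _a, b, _c in rows))
--     ydata = {b: [last.get((ak, b), 0) for ak in a_list] for b in b_order}
--
--     if restore_case:
--         a_list = [next((a2 for a2, _b, _c in rows if a2.lower() == a.lower()), a)
--                   for a in a_list]
--
--     return a_list, ydata
-- ===== Notes on version B (the rewrite author's own statement) =====
-- stated objective: alternative
-- what changed: B replaces A's imperative scatter (zero-filled lists mutated via a_list.index per row, and a joint a_list/a_counts loop) with a declarative gather: a counter dict built in one pass, the axis sorted from its keys, a last-write dict keyed by (x-key, legend) built in one pass, each ydata row produced by direct lookups, and the restore_case pass as a comprehension instead of index assignment.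
import Mathlib
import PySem

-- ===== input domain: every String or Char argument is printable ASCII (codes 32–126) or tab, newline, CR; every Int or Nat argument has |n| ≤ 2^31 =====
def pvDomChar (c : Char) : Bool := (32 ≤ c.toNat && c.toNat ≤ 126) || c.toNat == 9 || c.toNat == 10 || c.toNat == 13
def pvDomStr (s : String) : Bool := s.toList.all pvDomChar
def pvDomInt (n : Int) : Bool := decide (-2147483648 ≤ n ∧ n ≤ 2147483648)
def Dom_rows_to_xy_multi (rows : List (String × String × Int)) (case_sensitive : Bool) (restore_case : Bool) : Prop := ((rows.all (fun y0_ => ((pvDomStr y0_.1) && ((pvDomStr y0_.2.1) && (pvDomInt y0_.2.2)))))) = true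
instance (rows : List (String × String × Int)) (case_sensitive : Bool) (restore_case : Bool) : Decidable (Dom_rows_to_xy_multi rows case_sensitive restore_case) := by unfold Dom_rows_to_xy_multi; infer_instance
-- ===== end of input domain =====

-- B re-states the pivot declaratively (a counter dict plus a per-cell reverse scan instead of
-- in-place index assignment into zero-filled lists); alternative decomposition, no speed claim.

-- ===== PORT A =====
-- 'a if case_sensitive else a.lower()'
def pvKeyF (cs : Bool) (a : String) : String := if cs then a else PySem.Str.lower a

-- pass-1 loop body: collect distinct x-keys in order and sum the counts
def pvA_pass1step (cs : Bool) (st : List String × PySem.Dict String Int)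
    (r : String × String × Int) : List String × PySem.Dict String Int :=
  let a := pvKeyF cs r.1
  let st := if a ∈ st.1 then st else (st.1 ++ [a], st.2.insert a 0)
  -- a_counts[a if case_sensitive else a.lower()] += c; the key is always present at this
  -- point, so '+=' (get then store) is Dict.modify whose default is never used
  (st.1, st.2.modify (pvKeyF cs a) 0 (· + r.2.2))

-- pass-2 loop body: ydata[b] = [0]*len(a_list) if b absent, then ydata[b][a_index] = c
def pvA_ydstep (cs : Bool) (a_list : List String)
    (yd : PySem.Dict String (List Int)) (r : String × String × Int) : PySem.Dict String (List Int) :=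
  let yd := if yd.contains r.2.1 then yd else yd.insert r.2.1 (List.replicate a_list.length 0)
  -- a_list.index(...) always succeeds here (every key was collected in pass 1)
  let idx : Nat := (PySem.List.index? a_list (pvKeyF cs r.1)).getD 0
  yd.insert r.2.1 (PySem.List.pySetD (yd.getD r.2.1 []) (idx : Int) r.2.2)

def rows_to_xy_multi (rows : List (String × String × Int)) (case_sensitive : Bool) (restore_case : Bool) : List String × (List (String × List Int)) :=
  let st := rows.foldl (pvA_pass1step case_sensitive) ([], PySem.Dict.empty)
  let a_list := PySem.List.sorted st.1 (fun a => -(st.2.getD a 0)) false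
  let ydata := rows.foldl (pvA_ydstep case_sensitive a_list) PySem.Dict.empty
  let a_list := if restore_case then
      -- for i, a in enumerate(a_list): scan rows for the first matching lower, then break
      (PySem.List.enumerate a_list 0).foldl (fun acc p =>
        match rows.find? (fun r => PySem.Str.lower p.2 == PySem.Str.lower r.1) with
        | some r => PySem.List.pySetD acc p.1 r.1
        | none => acc) a_list
    else a_list
  (a_list, ydata.items)

-- ===== PORT B =====
def rows_to_xy_multi_alt (rows : List (String × String × Int)) (case_sensitive : Bool) (restore_case : Bool) : List String × (List (String × List Int)) :=
  let key : String → String := if case_sensitive then fun a => a else fun a => PySem.Str.lower a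
  let counts := rows.foldl (fun (d : PySem.Dict String Int) r =>
      d.insert (key r.1) (d.getD (key r.1) 0 + r.2.2)) PySem.Dict.empty
  let a_list := PySem.List.sorted counts.keys (fun a => -(counts.getD a 0)) false
  let last := rows.foldl (fun (d : PySem.Dict (String × String) Int) r =>
      d.insert (key r.1, r.2.1) r.2.2) PySem.Dict.empty
  let b_order := PySem.List.dedup (rows.map (fun r => r.2.1))   -- list(dict.fromkeys(...))
  let ydata := b_order.foldl (fun (d : PySem.Dict String (List Int)) b =>
      d.insert b (a_list.map (fun ak => last.getD (ak, b) 0)))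
    PySem.Dict.empty
  let a_list := if restore_case then
      a_list.map (fun a => ((rows.find? (fun r => PySem.Str.lower r.1 == PySem.Str.lower a)).map (fun r => r.1)).getD a)
    else a_list
  (a_list, ydata.items)

-- ===== PRECONDITION & SPEC =====
def Spec_rows_to_xy_multi (rows : List (String × String × Int)) (case_sensitive : Bool) (restore_case : Bool) (out : List String × (List (String × List Int))) : Prop := out = rows_to_xy_multi_alt rows case_sensitive restore_case
instance (rows : List (String × String × Int)) (case_sensitive : Bool) (restore_case : Bool) (out : List String × (List (String × List Int))) : Decidable (Spec_rows_to_xy_multi rows case_sensitive restore_case out) := by unfold Spec_rows_to_xy_multi; infer_instance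

-- ===== CLAIM (what is proved, stated in full; the proofs are below) =====
def Claim_equal_rows_to_xy_multi : Prop := ∀ (rows : List (String × String × Int)) (case_sensitive : Bool) (restore_case : Bool), Dom_rows_to_xy_multi rows case_sensitive restore_case → Spec_rows_to_xy_multi rows case_sensitive restore_case (rows_to_xy_multi rows case_sensitive restore_case)

-- ===== LEMMAS AND PROOFS =====

-- Python's str.lower is idempotent (character level: lowering a lowered char changes nothing)
theorem pv_lowerChar_idem (c : Char) : PySem.Chars.lowerChar (PySem.Chars.lowerChar c) = PySem.Chars.lowerChar c := by
  simp only [PySem.Chars.lowerChar, PySem.Chars.isupper]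
  split_ifs with h1 h2 <;> try rfl
  exfalso
  simp only [Bool.and_eq_true, decide_eq_true_eq, Char.le_def, UInt32.le_iff_toNat_le] at h1 h2
  have hA : ('A' : Char).val.toNat = 65 := by decide
  have hZ : ('Z' : Char).val.toNat = 90 := by decide
  rw [hA, hZ] at h1 h2
  have hvalid : (c.toNat + 32).isValidChar := by
    left; unfold Char.toNat at *; omega
  have hval : (Char.ofNat (c.toNat + 32)).toNat = c.toNat + 32 := by
    rw [Char.toNat_ofNat]; simp [hvalid]
  unfold Char.toNat at *
  omega

theorem pv_lower_idem (s : String) : PySem.Str.lower (PySem.Str.lower s) = PySem.Str.lower s := by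
  simp [PySem.Str.lower, PySem.Chars.lower, List.map_map, Function.comp_def, pv_lowerChar_idem]

theorem pvKeyF_idem (cs : Bool) (a : String) : pvKeyF cs (pvKeyF cs a) = pvKeyF cs a := by
  cases cs <;> simp [pvKeyF, pv_lower_idem]

theorem pvKeyF_fun (cs : Bool) :
    (if cs then fun (a : String) => a else fun a => PySem.Str.lower a) = pvKeyF cs := by
  cases cs <;> rfl

theorem pv_beq_comm (a b : String) : (a == b) = (b == a) := by
  rcases Bool.eq_false_or_eq_true (a == b) with h | h <;>
    rcases Bool.eq_false_or_eq_true (b == a) with h2 | h2 <;> simp_all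

-- ---- pass 1: A's joint (a_list, a_counts) loop equals B's counter loop ----

def pvB_cstep (cs : Bool) (d : PySem.Dict String Int) (r : String × String × Int) : PySem.Dict String Int :=
  d.insert (pvKeyF cs r.1) (d.getD (pvKeyF cs r.1) 0 + r.2.2)

theorem pv_not_contains_of_not_mem {κ ν : Type} [BEq κ] [LawfulBEq κ] (d : PySem.Dict κ ν) (k : κ)
    (h : k ∉ d.keys) : d.contains k = false := by
  rcases Bool.eq_false_or_eq_true (d.contains k) with h2 | h2
  · exact absurd ((PySem.Dict.contains_iff_mem_keys d k).mp h2) h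
  · exact h2

theorem pv_pass1_step (cs : Bool) (d : PySem.Dict String Int) (r : String × String × Int) :
    pvA_pass1step cs (d.keys, d) r = ((pvB_cstep cs d r).keys, pvB_cstep cs d r) := by
  by_cases hmem : pvKeyF cs r.1 ∈ d.keys
  · have hc : d.contains (pvKeyF cs r.1) = true := (PySem.Dict.contains_iff_mem_keys d _).mpr hmem
    simp only [pvA_pass1step, pvB_cstep, if_pos hmem, PySem.Dict.modify, pvKeyF_idem]
    rw [PySem.Dict.keys_insert_of_contains d _ hc]
  · have hc : d.contains (pvKeyF cs r.1) = false := pv_not_contains_of_not_mem d _ hmem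
    simp only [pvA_pass1step, pvB_cstep, if_neg hmem, PySem.Dict.modify, pvKeyF_idem,
      PySem.Dict.getD_insert_self, PySem.Dict.insert_insert_self,
      PySem.Dict.getD_of_not_contains d _ hc]
    rw [PySem.Dict.keys_insert_of_not_contains d _ hc]

theorem pv_pass1 (cs : Bool) (rows : List (String × String × Int)) :
    ∀ d : PySem.Dict String Int,
      rows.foldl (pvA_pass1step cs) (d.keys, d)
        = ((rows.foldl (pvB_cstep cs) d).keys, rows.foldl (pvB_cstep cs) d) := by
  induction rows with
  | nil => intro d; rfl
  | cons r rest ih =>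
      intro d
      rw [List.foldl_cons, List.foldl_cons, pv_pass1_step]
      exact ih _

-- ---- pass 2: A's scatter loop equals B's per-cell reverse-scan table ----

def pvLast (cs : Bool) (p : List (String × String × Int)) (b ak : String) : Int :=
  ((p.reverse.find? (fun r => r.2.1 == b && pvKeyF cs r.1 == ak)).map (fun r => r.2.2)).getD 0

def pvRow (cs : Bool) (L : List String) (p : List (String × String × Int)) (b : String) : String × List Int :=
  (b, L.map (fun ak => pvLast cs p b ak))

def pvItems (cs : Bool) (L : List String) (p : List (String × String × Int)) : List (String × List Int) :=
  (PySem.List.dedup (p.map (fun r => r.2.1))).map (pvRow cs L p)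

theorem pvLast_append (cs : Bool) (q : List (String × String × Int)) (r : String × String × Int)
    (b ak : String) :
    pvLast cs (q ++ [r]) b ak
      = if (r.2.1 == b && pvKeyF cs r.1 == ak) = true then r.2.2 else pvLast cs q b ak := by
  simp only [pvLast, List.reverse_append, List.reverse_singleton, List.singleton_append,
    List.find?_cons]
  split <;> rename_i h
  · rw [if_pos]
    · rfl
    · cases hb : (r.2.1 == b && pvKeyF cs r.1 == ak) <;> simp_all
  · rw [if_neg]
    cases hb : (r.2.1 == b && pvKeyF cs r.1 == ak) <;> simp_all

theorem pv_set_index : ∀ (L : List String), L.Nodup → ∀ v ∈ L, ∀ (f : String → Int) (c : Int),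
    (L.map f).set ((PySem.List.index? L v).getD 0) c = L.map (fun x => if x = v then c else f x) := by
  intro L
  induction L with
  | nil => intro _ v hv; cases hv
  | cons x xs ih =>
      intro hnd v hv f c
      by_cases hxv : x = v
      · subst hxv
        rw [PySem.List.index?_cons_self]
        simp only [Option.getD_some, List.map_cons, List.set_cons_zero]
        congr 1
        refine (List.map_congr_left ?_).symm
        intro y hy
        have hne : y ≠ x := fun h => (List.nodup_cons.mp hnd).1 (h ▸ hy)
        rw [if_neg hne]
      · have hvxs : v ∈ xs := by
          rcases hv with _ | h
          · exact absurd rfl hxv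
          · assumption
        rw [PySem.List.index?_cons_of_ne xs hxv]
        obtain ⟨k, hk⟩ := Option.isSome_iff_exists.mp ((PySem.List.index?_isSome_iff xs v).mpr hvxs)
        rw [hk]
        simp only [Option.map_some, Option.getD_some, List.map_cons, List.set_cons_succ,
          if_neg hxv]
        have := ih (List.nodup_cons.mp hnd).2 v hvxs f c
        rw [hk] at this
        simp only [Option.getD_some] at this
        rw [this]

theorem pv_dedup_append {α : Type} [BEq α] [LawfulBEq α] (xs : List α) (x : α) :
    PySem.List.dedup (xs ++ [x])
      = if x ∈ xs then PySem.List.dedup xs else PySem.List.dedup xs ++ [x] := by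
  have : PySem.List.dedup (xs ++ [x]) = PySem.Set.add (PySem.Set.ofList xs) x := by
    simp [PySem.List.dedup, PySem.Set.ofList, List.foldl_append]
  rw [this, PySem.Set.add]
  by_cases hx : x ∈ xs
  · rw [if_pos hx, if_pos]
    · rfl
    · have h2 : x ∈ PySem.Set.ofList xs := (PySem.Set.mem_ofList xs x).mpr hx
      simp [h2]
  · rw [if_neg hx, if_neg]
    · rfl
    · have : x ∉ PySem.Set.ofList xs := fun h => hx ((PySem.Set.mem_ofList xs x).mp h)
      simpa [List.contains_iff_mem] using this

theorem pv_pass2 (cs : Bool) (L : List String) (hnd : L.Nodup) :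
    ∀ p : List (String × String × Int), (∀ r ∈ p, pvKeyF cs r.1 ∈ L) →
      (p.foldl (pvA_ydstep cs L) PySem.Dict.empty).items = pvItems cs L p := by
  intro p
  induction p using List.reverseRecOn with
  | nil => intro _; rfl
  | append_singleton q r ih =>
      intro hmem
      have hq : ∀ x ∈ q, pvKeyF cs x.1 ∈ L := fun x hx => hmem x (by simp [hx])
      have hr : pvKeyF cs r.1 ∈ L := hmem r (by simp)
      have hI := ih hq
      rw [List.foldl_append, List.foldl_cons, List.foldl_nil]
      set D := q.foldl (pvA_ydstep cs L) PySem.Dict.empty with hD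
      have hkeys : D.keys = PySem.List.dedup (q.map (fun x => x.2.1)) := by
        show D.items.map Prod.fst = _
        rw [hI]
        simp [pvItems, pvRow, List.map_map, Function.comp_def]
      have hknd : D.keys.Nodup := by rw [hkeys]; exact PySem.List.nodup_dedup _
      have hdmap : (q ++ [r]).map (fun x => x.2.1) = q.map (fun x => x.2.1) ++ [r.2.1] := by
        simp
      by_cases hb : r.2.1 ∈ q.map (fun x => x.2.1)
      · -- the legend key b already has a row vector: in-place cell update
        have hcont : D.contains r.2.1 = true := by
          rw [PySem.Dict.contains_iff_mem_keys, hkeys]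
          exact (PySem.List.mem_dedup _ _).mpr hb
        have hget : D.getD r.2.1 [] = L.map (fun ak => pvLast cs q r.2.1 ak) := by
          refine PySem.Dict.getD_of_mem_items D ?_ hknd []
          rw [hI]
          exact List.mem_map_of_mem ((PySem.List.mem_dedup _ _).mpr hb)
        simp only [pvA_ydstep, hcont, if_true, hget, PySem.List.pySetD_natCast]
        rw [pv_set_index L hnd _ hr]
        rw [PySem.Dict.items_insert_of_contains _ _ hcont, hI]
        have hd : PySem.List.dedup ((q ++ [r]).map (fun x => x.2.1))
            = PySem.List.dedup (q.map (fun x => x.2.1)) := by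
          rw [hdmap, pv_dedup_append, if_pos hb]
        simp only [pvItems]
        rw [hd, List.map_map]
        refine List.map_congr_left ?_
        intro b' hb'
        simp only [Function.comp_apply, pvRow]
        by_cases hbb : b' = r.2.1
        · subst hbb
          simp only [BEq.rfl, if_true]
          congr 1
          refine (List.map_congr_left ?_).symm
          intro ak hak
          rw [pvLast_append]
          by_cases hak2 : ak = pvKeyF cs r.1
          · subst hak2
            rw [if_pos (by simp), if_pos rfl]
          · rw [if_neg (by simp [Ne.symm hak2]), if_neg hak2]
        · rw [if_neg (by simp [hbb])]
          congr 1
          refine (List.map_congr_left ?_).symm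
          intro ak hak
          rw [pvLast_append, if_neg (by simp [Ne.symm hbb])]
      · -- fresh legend key b: a zero row is created, then one cell set
        have hnotmem : r.2.1 ∉ D.keys := by
          rw [hkeys]
          exact fun h => hb ((PySem.List.mem_dedup _ _).mp h)
        have hcont : D.contains r.2.1 = false := pv_not_contains_of_not_mem D _ hnotmem
        have hzeros : List.replicate L.length (0 : Int) = L.map (fun _ => 0) := by
          rw [← List.map_const]; rfl
        simp only [pvA_ydstep, hcont, Bool.false_eq_true, if_false,
          PySem.Dict.getD_insert_self, PySem.List.pySetD_natCast]
        rw [hzeros, pv_set_index L hnd _ hr]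
        rw [PySem.Dict.items_insert_of_contains _ _ (PySem.Dict.contains_insert_self D _ _),
          PySem.Dict.items_insert_of_not_contains _ _ hcont, hI]
        have hd : PySem.List.dedup ((q ++ [r]).map (fun x => x.2.1))
            = PySem.List.dedup (q.map (fun x => x.2.1)) ++ [r.2.1] := by
          rw [hdmap, pv_dedup_append, if_neg hb]
        simp only [pvItems]
        rw [hd, List.map_append, List.map_append, List.map_map]
        congr 1
        · refine List.map_congr_left ?_
          intro b' hb'
          have hbb : b' ≠ r.2.1 := fun h => hb (h ▸ (PySem.List.mem_dedup _ _).mp hb')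
          simp only [Function.comp_apply, pvRow]
          rw [if_neg (by simp [hbb])]
          congr 1
          refine (List.map_congr_left ?_).symm
          intro ak hak
          rw [pvLast_append, if_neg (by simp [Ne.symm hbb])]
        · simp only [List.map_cons, List.map_nil, BEq.rfl, if_true, pvRow]
          have hnone : ∀ ak, pvLast cs q r.2.1 ak = 0 := by
            intro ak
            have : q.reverse.find? (fun x => x.2.1 == r.2.1 && pvKeyF cs x.1 == ak) = none := by
              rw [List.find?_eq_none]
              intro x hx
              have : x.2.1 ≠ r.2.1 := by
                intro h
                exact hb (h ▸ List.mem_map_of_mem (List.mem_reverse.mp hx))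
              simp [this]
            simp [pvLast, this]
          congr 2
          refine (List.map_congr_left ?_).symm
          intro ak hak
          rw [pvLast_append, hnone ak]
          by_cases hak2 : ak = pvKeyF cs r.1
          · subst hak2
            rw [if_pos (by simp), if_pos rfl]
          · rw [if_neg (by simp [Ne.symm hak2]), if_neg hak2]

-- B's last-write dict looked up at (ak, b) is exactly the last matching row's c
theorem pv_last_getD (cs : Bool) (rows : List (String × String × Int)) (b ak : String) :
    (rows.foldl (fun (d : PySem.Dict (String × String) Int) r =>
        d.insert (pvKeyF cs r.1, r.2.1) r.2.2) PySem.Dict.empty).getD (ak, b) 0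
      = pvLast cs rows b ak := by
  induction rows using List.reverseRecOn with
  | nil => rfl
  | append_singleton q r ih =>
      rw [List.foldl_append, List.foldl_cons, List.foldl_nil, PySem.Dict.getD_insert,
        pvLast_append]
      by_cases h : (ak, b) = (pvKeyF cs r.1, r.2.1)
      · rw [if_pos h, if_pos]
        rcases h with ⟨h1, h2⟩
        simp
      · rw [if_neg h, if_neg, ih]
        intro hc
        apply h
        rcases Bool.and_eq_true_iff.mp hc with ⟨h1, h2⟩
        simp only [beq_iff_eq] at h1 h2
        rw [h1, h2]

theorem pvB_items (cs : Bool) (L : List String) (rows : List (String × String × Int)) :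
    ((PySem.List.dedup (rows.map (fun r => r.2.1))).foldl
        (fun (d : PySem.Dict String (List Int)) b =>
          d.insert b (L.map (fun ak =>
            (rows.foldl (fun (d2 : PySem.Dict (String × String) Int) r =>
                d2.insert (pvKeyF cs r.1, r.2.1) r.2.2) PySem.Dict.empty).getD (ak, b) 0)))
        PySem.Dict.empty).items = pvItems cs L rows := by
  rw [PySem.Dict.items_foldl_insert_fresh _ (fun b => b) _ PySem.Dict.empty
    (fun a _ => PySem.Dict.contains_empty a)
    (by simpa using PySem.List.nodup_dedup (rows.map (fun r => r.2.1)))]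
  rw [show (PySem.Dict.empty : PySem.Dict String (List Int)).items = [] from rfl,
    List.nil_append]
  refine List.map_congr_left ?_
  intro b _
  simp only [pvRow]
  rw [show (fun ak => (rows.foldl (fun (d2 : PySem.Dict (String × String) Int) r =>
      d2.insert (pvKeyF cs r.1, r.2.1) r.2.2) PySem.Dict.empty).getD (ak, b) 0)
    = fun ak => pvLast cs rows b ak from funext fun ak => pv_last_getD cs rows b ak]

-- ---- restore_case: A's enumerate-and-assign loop equals B's map ----

theorem pv_restore (rows : List (String × String × Int)) :
    ∀ (xs pre : List String),
      (PySem.List.enumerate xs (pre.length : Int)).foldl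
        (fun acc p => match rows.find? (fun r => PySem.Str.lower p.2 == PySem.Str.lower r.1) with
          | some r => PySem.List.pySetD acc p.1 r.1
          | none => acc) (pre ++ xs)
      = pre ++ xs.map (fun a =>
          ((rows.find? (fun r => PySem.Str.lower a == PySem.Str.lower r.1)).map
            (fun r => r.1)).getD a) := by
  intro xs
  induction xs with
  | nil => intro pre; simp [PySem.List.enumerate]
  | cons a xs ih =>
      intro pre
      rw [PySem.List.enumerate_cons, List.foldl_cons]
      have hstep : (match rows.find? (fun r => PySem.Str.lower a == PySem.Str.lower r.1) with
          | some r => PySem.List.pySetD (pre ++ a :: xs) ((pre.length : Nat) : Int) r.1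
          | none => pre ++ a :: xs)
          = (pre ++ [((rows.find? (fun r => PySem.Str.lower a == PySem.Str.lower r.1)).map
              (fun r => r.1)).getD a]) ++ xs := by
        cases h : rows.find? (fun r => PySem.Str.lower a == PySem.Str.lower r.1) with
        | some r => simp [PySem.List.pySetD_natCast]
        | none => simp
      rw [hstep]
      have := ih (pre ++ [((rows.find? (fun r => PySem.Str.lower a == PySem.Str.lower r.1)).map
              (fun r => r.1)).getD a])
      simp only [List.length_append, List.length_cons, List.length_nil, Nat.cast_add,
        Nat.cast_one, Nat.cast_zero, List.append_assoc, List.singleton_append,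
        List.map_cons] at this ⊢
      convert this using 3

theorem pv_findrow_comm (rows : List (String × String × Int)) (a : String) :
    rows.find? (fun r => PySem.Str.lower r.1 == PySem.Str.lower a)
      = rows.find? (fun r => PySem.Str.lower a == PySem.Str.lower r.1) := by
  congr 1
  funext r
  exact pv_beq_comm _ _

-- ===== VERDICT (by name: the statement is the Claim_ definition above) =====
theorem rows_to_xy_multi_spec : Claim_equal_rows_to_xy_multi := by
  intro rows cs rc _hdom
  unfold Spec_rows_to_xy_multi
  simp only [rows_to_xy_multi, rows_to_xy_multi_alt, pvKeyF_fun]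
  rw [show (fun (d : PySem.Dict String Int) (r : String × String × Int) =>
        d.insert (pvKeyF cs r.1) (d.getD (pvKeyF cs r.1) 0 + r.2.2)) = pvB_cstep cs from rfl]
  rw [show (([] : List String), (PySem.Dict.empty : PySem.Dict String Int))
        = ((PySem.Dict.empty : PySem.Dict String Int).keys, (PySem.Dict.empty : PySem.Dict String Int)) from rfl]
  rw [pv_pass1 cs rows PySem.Dict.empty]
  set C := rows.foldl (pvB_cstep cs) PySem.Dict.empty with hC
  have hkeysC : C.keys = PySem.Set.ofList (rows.map (fun x => pvKeyF cs x.1)) := by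
    rw [hC, show pvB_cstep cs = (fun (d : PySem.Dict String Int) (x : String × String × Int) =>
      d.insert ((fun x : String × String × Int => pvKeyF cs x.1) x)
        ((fun (d : PySem.Dict String Int) (x : String × String × Int) =>
          d.getD (pvKeyF cs x.1) 0 + x.2.2) d x)) from rfl]
    rw [PySem.Dict.keys_foldl_insert_key rows (fun x : String × String × Int => pvKeyF cs x.1) _
      PySem.Dict.empty]
    rfl
  have hknd : C.keys.Nodup := by
    rw [hkeysC]; exact PySem.Set.nodup_ofList _
  set L := PySem.List.sorted C.keys (fun a => -(C.getD a 0)) false with hL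
  have hndL : L.Nodup := ((PySem.List.sorted_perm C.keys _ false).symm).nodup hknd
  have hmemL : ∀ r ∈ rows, pvKeyF cs r.1 ∈ L := by
    intro r hrr
    rw [hL, PySem.List.mem_sorted, hkeysC, PySem.Set.mem_ofList]
    exact List.mem_map_of_mem hrr
  refine Prod.ext ?_ ?_
  · -- the x-axis list (with the optional restore_case pass)
    cases rc
    · rfl
    · simp only [if_true]
      have := pv_restore rows L []
      simp only [List.nil_append, Nat.cast_zero, List.length_nil] at this
      rw [this]
      refine List.map_congr_left ?_
      intro a _
      rw [pv_findrow_comm]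
  · -- the stacked y-data
    rw [pv_pass2 cs L hndL rows hmemL, ← pvB_items cs L rows]
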